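-- pv_equiv track=rewrite | github.com/mmWaveLab/mmwavelab-dca1000 | src/mmwavelab_dca1000/radar_config.py | clean_cfg_lines
-- ===== SOURCE A (Python) =====
-- def clean_cfg_lines(text: str) -> list[str]:
--     lines: list[str] = []
--     for raw in text.splitlines():
--         line = raw.strip()
--         if not line or line.startswith(("%", "#", "//")):
--             continue
--         for marker in ("%", "#", "//"):
--             if marker in line:
--                 line = line.split(marker, 1)[0].strip()
--         if line:
--             lines.append(line)
--     return lines
-- ===== SOURCE B (Python) =====
-- def clean_cfg_lines(text: str) -> list[str]:
--     cleaned: list[str] = []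
--     for raw in text.splitlines():
--         line = raw.strip()
--         # one left-to-right scan: stop at the first comment marker
--         i, n = 0, len(line)
--         while i < n and line[i] != "%" and line[i] != "#" and not line.startswith("//", i):
--             i += 1
--         line = line[:i].rstrip()  # already left-stripped above
--         if line:
--             cleaned.append(line)
--     return cleaned
-- ===== Notes on version B (the rewrite author's own statement) =====
-- stated objective: alternative
-- what changed: A's blank/comment-start guard plus a loop over the three markers doing split(marker,1)[0].strip() per marker is replaced by one left-to-right scan of each stripped line that stops at the first comment marker ('%', '#' or '//') and a single rstrip of the scanned prefix; blank results are simply dropped, so the guard disappears.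
import Mathlib
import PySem

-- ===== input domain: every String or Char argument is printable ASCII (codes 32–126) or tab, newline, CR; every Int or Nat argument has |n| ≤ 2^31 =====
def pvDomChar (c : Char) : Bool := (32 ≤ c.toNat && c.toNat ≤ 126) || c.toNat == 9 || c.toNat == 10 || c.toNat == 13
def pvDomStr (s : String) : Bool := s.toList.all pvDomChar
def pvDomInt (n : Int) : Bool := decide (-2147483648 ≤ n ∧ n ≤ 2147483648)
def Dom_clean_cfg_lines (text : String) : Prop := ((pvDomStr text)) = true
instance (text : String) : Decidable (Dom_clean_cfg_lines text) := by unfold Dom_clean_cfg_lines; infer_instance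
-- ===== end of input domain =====

-- B replaces A's per-marker split-and-restrip loop (plus its blank/comment-start guard) by a single
-- left-to-right scan of each stripped line that cuts at the first comment marker; objective: alternative (one scan instead of per-marker passes).

-- ===== PORT A =====
-- the body of A's `for raw in text.splitlines()` loop (acc = lines)
def pvAStep (lines : List String) (raw : String) : List String :=
  let line := PySem.Str.strip raw
  if line = "" ∨ PySem.Str.startswith line "%" = true ∨ PySem.Str.startswith line "#" = true
      ∨ PySem.Str.startswith line "//" = true then
    lines
  else
    -- `for marker in ("%", "#", "//"): if marker in line: line = line.split(marker, 1)[0].strip()`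
    -- `.getD [] / .getD 0 ""` are unreachable defaults: the marker is a nonempty literal that does occur in `line`,
    -- so `split` returns `some` of a nonempty list (Python raises nothing here).
    let line2 := ["%", "#", "//"].foldl (fun line marker =>
      if PySem.Str.isIn marker line = true then
        PySem.Str.strip (((PySem.Str.splitMax? line marker 1).getD []).getD 0 "")
      else line) line
    if line2 ≠ "" then lines ++ [line2] else lines

def clean_cfg_lines (text : String) : List String :=
  (PySem.Str.splitlines text).foldl pvAStep []

-- ===== PORT B =====
-- Source B's `while i < n and line[i] != "%" and line[i] != "#" and not line.startswith("//", i): i += 1; line[:i]`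
-- as the obvious structural recursion over the same characters (the scanned prefix is built directly)
def pvCutCfg : List Char → List Char
  | [] => []
  | c :: rest =>
    if c = '%' ∨ c = '#' ∨ PySem.Chars.startswith (c :: rest) ['/', '/'] = true then []
    else c :: pvCutCfg rest

-- the body of Source B's `for raw in text.splitlines()` loop (acc = cleaned)
def pvBStep (cleaned : List String) (raw : String) : List String :=
  let line := String.ofList (PySem.Chars.rstrip (pvCutCfg (PySem.Str.strip raw).toList))
  if line ≠ "" then cleaned ++ [line] else cleaned

def clean_cfg_lines_alt (text : String) : List String :=
  (PySem.Str.splitlines text).foldl pvBStep []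

-- ===== PRECONDITION & SPEC =====
def Spec_clean_cfg_lines (text : String) (out : List String) : Prop := out = clean_cfg_lines_alt text
instance (text : String) (out : List String) : Decidable (Spec_clean_cfg_lines text out) := by unfold Spec_clean_cfg_lines; infer_instance

-- ===== CLAIM (what is proved, stated in full; the proofs are below) =====
def Claim_equal_clean_cfg_lines : Prop := ∀ (text : String), Dom_clean_cfg_lines text → Spec_clean_cfg_lines text (clean_cfg_lines text)

-- ===== LEMMAS AND PROOFS =====

-- prefix of the line before the first occurrence of `m` (= what `line.split(m, 1)[0]` returns)
def pvCut (m : List Char) : List Char → List Char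
  | [] => []
  | c :: r => if m.isPrefixOf (c :: r) then [] else c :: pvCut m r

-- the part after the first occurrence of `m`, if any
def pvCutRest (m : List Char) : List Char → Option (List Char)
  | [] => if m.isPrefixOf ([] : List Char) then some [] else none
  | c :: r => if m.isPrefixOf (c :: r) then some ((c :: r).drop m.length) else pvCutRest m r

-- one `strip`-composed cut, the shape both programs' per-marker work reduces to
def pvF (m : List Char) (x : List Char) : List Char := PySem.Chars.rstrip (pvCut m x)

lemma pv_rstrip_nil : PySem.Chars.rstrip ([] : List Char) = [] := rfl

lemma pv_rstrip_cons (c : Char) (z : List Char) :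
    PySem.Chars.rstrip (c :: z) =
      if PySem.Chars.rstrip z = [] then (if PySem.Chars.isspace c then [] else [c])
      else c :: PySem.Chars.rstrip z := by
  show (List.dropWhile PySem.Chars.isspace (c :: z).reverse).reverse = _
  rw [List.reverse_cons, List.dropWhile_append]
  by_cases h1 : List.dropWhile PySem.Chars.isspace z.reverse = []
  · rw [if_pos (by simp [h1])]
    rw [if_pos (show PySem.Chars.rstrip z = [] by simp [PySem.Chars.rstrip, h1])]
    cases hc : PySem.Chars.isspace c <;> simp [List.dropWhile, hc]
  · rw [if_neg (by simp [h1])]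
    rw [if_neg (show ¬ PySem.Chars.rstrip z = [] by simp [PySem.Chars.rstrip, h1])]
    simp [PySem.Chars.rstrip]

lemma pv_rstrip_idem (z : List Char) :
    PySem.Chars.rstrip (PySem.Chars.rstrip z) = PySem.Chars.rstrip z := by
  simp [PySem.Chars.rstrip, List.dropWhile_idempotent]

lemma pv_rstrip_cons_rstrip (c : Char) (z : List Char) :
    PySem.Chars.rstrip (c :: PySem.Chars.rstrip z) = PySem.Chars.rstrip (c :: z) := by
  rw [pv_rstrip_cons c (PySem.Chars.rstrip z), pv_rstrip_idem, pv_rstrip_cons c z]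

lemma pv_rstrip_cons_of_not_space {c : Char} (h : PySem.Chars.isspace c = false) (z : List Char) :
    PySem.Chars.rstrip (c :: z) = c :: PySem.Chars.rstrip z := by
  rw [pv_rstrip_cons]; split_ifs with h1 h2
  · simp [h] at h2
  · rw [h1]
  · rfl

lemma pv_rstrip_prefix (z : List Char) : PySem.Chars.rstrip z <+: z := by
  have := List.reverse_prefix.mpr (List.dropWhile_suffix (l := z.reverse) PySem.Chars.isspace)
  simpa [PySem.Chars.rstrip] using this

lemma pv_cut_prefix (m x : List Char) : pvCut m x <+: x := by
  induction x with
  | nil => exact List.nil_prefix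
  | cons c r ih =>
    rw [pvCut]
    split
    · exact List.nil_prefix
    · exact List.cons_prefix_cons.mpr ⟨rfl, ih⟩

lemma pv_cut_of_not_isIn {m x : List Char} (h : PySem.Chars.isIn m x = false) : pvCut m x = x := by
  have hni : ¬ m <:+: x := (PySem.Chars.isIn_eq_false_iff m x).mp h
  clear h
  induction x with
  | nil => rfl
  | cons c r ih =>
    rw [pvCut, if_neg (fun hp => hni (List.isPrefixOf_iff_prefix.mp hp).isInfix),
        ih (fun h' => hni (List.infix_cons h'))]

lemma pvF_rstripped (m x : List Char) : PySem.Chars.rstrip (pvF m x) = pvF m x :=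
  pv_rstrip_idem _

lemma pvF_prefix (m x : List Char) : pvF m x <+: x :=
  (pv_rstrip_prefix _).trans (pv_cut_prefix m x)

lemma pvF_cons {m : List Char} {c : Char} {x : List Char} (h : m.isPrefixOf (c :: x) = false) :
    pvF m (c :: x) = PySem.Chars.rstrip (c :: pvF m x) := by
  show PySem.Chars.rstrip (pvCut m (c :: x)) = _
  rw [pvCut, if_neg (by simp [h])]
  exact (pv_rstrip_cons_rstrip c (pvCut m x)).symm

lemma pv_prefix_head {y x : List Char} (h : y <+: x) (hy : y ≠ []) : y.head? = x.head? := by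
  obtain ⟨t, rfl⟩ := h
  cases y with
  | nil => exact absurd rfl hy
  | cons a b => rfl

lemma pv_rstrip_cons_ne {z : List Char} (c : Char) (h : PySem.Chars.rstrip z = z) (hne : z ≠ []) :
    PySem.Chars.rstrip (c :: z) = c :: z := by
  rw [pv_rstrip_cons, h, if_neg hne]

-- ===== the crux: three sequential cuts-with-strip equal the single earliest-marker scan =====
lemma pv_main (s : List Char) :
    pvF ['/', '/'] (pvF ['#'] (pvF ['%'] s)) = PySem.Chars.rstrip (pvCutCfg s) := by
  induction s with
  | nil => rfl
  | cons c r ih =>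
    by_cases hpc : c = '%'
    · subst hpc
      rw [pvCutCfg, if_pos (Or.inl rfl)]
      show pvF _ (pvF _ (PySem.Chars.rstrip (pvCut _ ('%' :: r)))) = _
      rw [pvCut, if_pos (by simp [List.isPrefixOf])]
      rfl
    · by_cases hhc : c = '#'
      · subst hhc
        rw [pvCutCfg, if_pos (Or.inr (Or.inl rfl))]
        rw [pvF_cons (by simp [List.isPrefixOf]),
            pv_rstrip_cons_of_not_space (by decide), pvF_rstripped]
        show pvF _ (PySem.Chars.rstrip (pvCut ['#'] ('#' :: pvF ['%'] r))) = _
        rw [pvCut, if_pos (by simp [List.isPrefixOf])]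
        rfl
      · by_cases hsl : PySem.Chars.startswith (c :: r) ['/', '/'] = true
        · -- line starts with "//"
          have hc : c = '/' := by
            cases hcc : ('/' == c) with
            | false => simp [PySem.Chars.startswith, List.isPrefixOf, hcc] at hsl
            | true => exact (beq_iff_eq.mp hcc).symm
          subst hc
          obtain ⟨r2, rfl⟩ : ∃ r2, r = '/' :: r2 := by
            cases r with
            | nil => simp [PySem.Chars.startswith, List.isPrefixOf] at hsl
            | cons d r2 =>
              cases hdd : ('/' == d) with
              | false => simp [PySem.Chars.startswith, List.isPrefixOf, hdd] at hsl
              | true => exact ⟨r2, by rw [beq_iff_eq.mp hdd]⟩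
          rw [pvCutCfg, if_pos (Or.inr (Or.inr hsl))]
          have hA : pvF ['%'] ('/' :: '/' :: r2) = '/' :: '/' :: pvF ['%'] r2 := by
            rw [pvF_cons (by simp [List.isPrefixOf]), pvF_cons (by simp [List.isPrefixOf]),
                pv_rstrip_cons_rstrip, pv_rstrip_cons_of_not_space (by decide),
                pv_rstrip_cons_of_not_space (by decide), pvF_rstripped]
          have h2 : pvF ['#'] ('/' :: '/' :: pvF ['%'] r2)
              = '/' :: '/' :: PySem.Chars.rstrip (pvCut ['#'] (pvF ['%'] r2)) := by
            show PySem.Chars.rstrip (pvCut ['#'] _) = _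
            rw [pvCut, if_neg (by simp [List.isPrefixOf]),
                pvCut, if_neg (by simp [List.isPrefixOf]),
                pv_rstrip_cons_of_not_space (by decide),
                pv_rstrip_cons_of_not_space (by decide)]
          have h3 : ∀ z : List Char, pvF ['/', '/'] ('/' :: '/' :: z) = [] := by
            intro z
            show PySem.Chars.rstrip (pvCut ['/', '/'] _) = _
            rw [pvCut, if_pos (by simp [List.isPrefixOf])]
            rfl
          rw [hA, h2, h3]
          rfl
        · -- ordinary character: scan keeps it
          rw [pvCutCfg, if_neg (by
            rintro (h | h | h)
            · exact hpc h
            · exact hhc h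
            · exact hsl h)]
          rw [pvF_cons (by simp [List.isPrefixOf, Ne.symm hpc])]
          by_cases hA : pvF ['%'] r = []
          · have hcc : PySem.Chars.rstrip (pvCutCfg r) = [] := by rw [← ih, hA]; rfl
            rw [hA, ← pv_rstrip_cons_rstrip c (pvCutCfg r), hcc]
            by_cases hsp : PySem.Chars.isspace c = true
            · rw [show PySem.Chars.rstrip [c] = ([] : List Char) by
                rw [pv_rstrip_cons]; simp [pv_rstrip_nil, hsp]]
              rfl
            · have h1 : PySem.Chars.rstrip [c] = [c] := by
                rw [pv_rstrip_cons]; simp [pv_rstrip_nil, hsp]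
              rw [h1]
              show pvF _ (PySem.Chars.rstrip (pvCut ['#'] [c])) = _
              rw [pvCut, if_neg (by simp [List.isPrefixOf, Ne.symm hhc]), pvCut, h1]
              show PySem.Chars.rstrip (pvCut ['/', '/'] [c]) = _
              rw [pvCut, if_neg (by simp [List.isPrefixOf]), pvCut, h1]
          · rw [pv_rstrip_cons_ne c (pvF_rstripped _ _) hA]
            rw [pvF_cons (by simp [List.isPrefixOf, Ne.symm hhc])]
            by_cases hB : pvF ['#'] (pvF ['%'] r) = []
            · have hcc : PySem.Chars.rstrip (pvCutCfg r) = [] := by rw [← ih, hB]; rfl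
              rw [hB, ← pv_rstrip_cons_rstrip c (pvCutCfg r), hcc]
              by_cases hsp : PySem.Chars.isspace c = true
              · rw [show PySem.Chars.rstrip [c] = ([] : List Char) by
                  rw [pv_rstrip_cons]; simp [pv_rstrip_nil, hsp]]
                rfl
              · have h1 : PySem.Chars.rstrip [c] = [c] := by
                  rw [pv_rstrip_cons]; simp [pv_rstrip_nil, hsp]
                rw [h1]
                show PySem.Chars.rstrip (pvCut ['/', '/'] [c]) = _
                rw [pvCut, if_neg (by simp [List.isPrefixOf]), pvCut, h1]
            · rw [pv_rstrip_cons_ne c (pvF_rstripped _ _) hB]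
              have hnp : (['/', '/'] : List Char).isPrefixOf (c :: pvF ['#'] (pvF ['%'] r)) = false := by
                cases hcs : ('/' == c) with
                | false => simp [List.isPrefixOf, hcs]
                | true =>
                  have hc : c = '/' := (beq_iff_eq.mp hcs).symm
                  subst hc
                  have hpre : pvF ['#'] (pvF ['%'] r) <+: r :=
                    (pvF_prefix _ _).trans (pvF_prefix _ _)
                  have hhd := pv_prefix_head hpre hB
                  cases hb : pvF ['#'] (pvF ['%'] r) with
                  | nil => exact absurd hb hB
                  | cons b bs =>
                    rw [hb] at hhd
                    cases r with
                    | nil => simp at hhd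
                    | cons d ds =>
                      have hbd : b = d := by simpa using hhd
                      subst hbd
                      have hd : ('/' == b) = false := by
                        cases hdb : ('/' == b) with
                        | false => rfl
                        | true =>
                          exfalso
                          apply hsl
                          simp [PySem.Chars.startswith, List.isPrefixOf, hdb]
                      simp [List.isPrefixOf, hd]
              rw [pvF_cons hnp, ih, pv_rstrip_cons_rstrip]

-- guard lines (blank or comment-start) are exactly those whose scan-prefix strips to nothing
lemma pv_guard {s : List Char}
    (h : s = [] ∨ PySem.Chars.startswith s ['%'] = true ∨ PySem.Chars.startswith s ['#'] = true
        ∨ PySem.Chars.startswith s ['/', '/'] = true) :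
    pvCutCfg s = [] := by
  cases s with
  | nil => rfl
  | cons c r =>
    rw [pvCutCfg]
    rcases h with h | h | h | h
    · exact absurd h (by simp)
    · exact if_pos (Or.inl (by
        have : ('%' == c) = true := by
          by_contra hc
          simp [PySem.Chars.startswith, List.isPrefixOf,
            Bool.not_eq_true _ |>.mp hc] at h
        exact (beq_iff_eq.mp this).symm))
    · exact if_pos (Or.inr (Or.inl (by
        have : ('#' == c) = true := by
          by_contra hc
          simp [PySem.Chars.startswith, List.isPrefixOf,
            Bool.not_eq_true _ |>.mp hc] at h
        exact (beq_iff_eq.mp this).symm)))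
    · exact if_pos (Or.inr (Or.inr h))

-- a stripped line stays stripped along the chain
lemma pv_lstrip_prefix {y x : List Char} (h : y <+: x) (hx : PySem.Chars.lstrip x = x) :
    PySem.Chars.lstrip y = y := by
  cases y with
  | nil => rfl
  | cons a b =>
    obtain ⟨t, rfl⟩ := h
    have ha : PySem.Chars.isspace a = false := by
      by_contra hc
      have hc' : PySem.Chars.isspace a = true := by
        cases hsp : PySem.Chars.isspace a
        · exact absurd hsp hc
        · rfl
      have := hx
      rw [show PySem.Chars.lstrip (a :: b ++ t) = List.dropWhile PySem.Chars.isspace (a :: (b ++ t)) from rfl,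
          List.dropWhile_cons, if_pos hc'] at this
      have hlen := List.length_dropWhile_le PySem.Chars.isspace (b ++ t)
      rw [this] at hlen
      simp at hlen
    show List.dropWhile PySem.Chars.isspace (a :: b) = a :: b
    rw [List.dropWhile_cons, if_neg (by simp [ha])]

lemma pv_lstrip_idem (x : List Char) :
    PySem.Chars.lstrip (PySem.Chars.lstrip x) = PySem.Chars.lstrip x :=
  List.dropWhile_idempotent _ _

lemma pv_strip_lstripped (x : List Char) :
    PySem.Chars.lstrip (PySem.Chars.strip x) = PySem.Chars.strip x :=
  pv_lstrip_prefix (pv_rstrip_prefix _) (pv_lstrip_idem x)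

lemma pv_strip_rstripped (x : List Char) :
    PySem.Chars.rstrip (PySem.Chars.strip x) = PySem.Chars.strip x :=
  pv_rstrip_idem _

lemma pv_strip_of_lstripped {x : List Char} (h : PySem.Chars.lstrip x = x) :
    PySem.Chars.strip x = PySem.Chars.rstrip x := by
  show PySem.Chars.rstrip (PySem.Chars.lstrip x) = _
  rw [h]

-- split(go) characterisation: maxsplit exhausted / one split left
lemma pv_go0 (m : List Char) (fuel : Nat) (t cur : List Char) (acc : List (List Char)) :
    PySem.Chars.splitOnMax.go m fuel 0 t cur acc = acc.reverse ++ [cur.reverse ++ t] := by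
  rw [PySem.Chars.splitOnMax.go.eq_def]
  rcases fuel with _ | f <;> rcases t with _ | ⟨c, r⟩ <;> simp

lemma pv_go1 (m : List Char) (hm : m ≠ []) (t : List Char) :
    ∀ (fuel : Nat), t.length < fuel → ∀ (cur : List Char) (acc : List (List Char)),
    PySem.Chars.splitOnMax.go m fuel 1 t cur acc =
      acc.reverse ++ (cur.reverse ++ pvCut m t) :: (pvCutRest m t).toList := by
  induction t with
  | nil =>
    intro fuel hf cur acc
    rcases fuel with _ | f
    · omega
    · rw [PySem.Chars.splitOnMax.go.eq_def]
      simp [pvCut, pvCutRest, List.isPrefixOf_iff_prefix, List.prefix_nil, hm]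
  | cons c r ih =>
    intro fuel hf cur acc
    rcases fuel with _ | f
    · omega
    · rw [PySem.Chars.splitOnMax.go.eq_def]
      by_cases hp : m.isPrefixOf (c :: r) = true
      · simp only [hp, if_true, if_neg (by omega : ¬ (1 : Nat) = 0)]
        rw [pv_go0]
        rw [pvCut, if_pos hp, pvCutRest, if_pos hp]
        simp
      · simp only [hp, if_false, if_neg (by omega : ¬ (1 : Nat) = 0), Bool.false_eq_true]
        rw [ih f (by simpa using Nat.lt_of_succ_lt_succ hf) (c :: cur) acc]
        rw [pvCut, if_neg (by simp [hp]), pvCutRest, if_neg (by simp [hp])]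
        simp

-- `line.split(m, 1)` = the part before the first occurrence of `m`, then the part after it
lemma pv_splitOnMax_eq (m t : List Char) (hm : m ≠ []) :
    PySem.Chars.splitOnMax t m 1 = pvCut m t :: (pvCutRest m t).toList := by
  rw [show PySem.Chars.splitOnMax t m 1 = PySem.Chars.splitOnMax.go m (t.length + 1) 1 t [] [] by
        rw [PySem.Chars.splitOnMax]; norm_num]
  rw [pv_go1 m hm t (t.length + 1) (by omega) [] []]
  simp

-- A's one marker step (`if marker in line: line = line.split(marker, 1)[0].strip()`)
-- equals pvF on a stripped line
lemma pv_stepA (m : String) (hm : m.toList ≠ []) (line : String)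
    (hl : PySem.Chars.lstrip line.toList = line.toList)
    (hr : PySem.Chars.rstrip line.toList = line.toList) :
    (if PySem.Str.isIn m line = true then
        PySem.Str.strip (((PySem.Str.splitMax? line m 1).getD []).getD 0 "")
      else line) = String.ofList (pvF m.toList line.toList) := by
  by_cases hin : PySem.Chars.isIn m.toList line.toList = true
  · rw [if_pos (show PySem.Str.isIn m line = true from hin)]
    have hs : PySem.Str.splitMax? line m 1
        = some (String.ofList (pvCut m.toList line.toList)
            :: List.map String.ofList (pvCutRest m.toList line.toList).toList) := by
      rw [PySem.Str.splitMax?, PySem.Chars.splitMax?, if_neg (by simpa using hm)]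
      rw [pv_splitOnMax_eq m.toList line.toList hm]
      rfl
    rw [hs]
    show PySem.Str.strip (String.ofList (pvCut m.toList line.toList)) = _
    rw [PySem.Str.strip, String.toList_ofList,
        pv_strip_of_lstripped (pv_lstrip_prefix (pv_cut_prefix _ _) hl)]
    rfl
  · rw [if_neg (show ¬ PySem.Str.isIn m line = true from hin)]
    have hcut : pvCut m.toList line.toList = line.toList :=
      pv_cut_of_not_isIn (by
        cases h : PySem.Chars.isIn m.toList line.toList
        · rfl
        · exact absurd h hin)
    rw [pvF, hcut, hr, String.ofList_toList]

-- ===== per-line equality, then the fold =====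
lemma pv_step_eq : pvAStep = pvBStep := by
  funext acc raw
  rw [pvAStep, pvBStep]
  have hl : PySem.Chars.lstrip (PySem.Str.strip raw).toList = (PySem.Str.strip raw).toList := by
    rw [PySem.Str.strip, String.toList_ofList]; exact pv_strip_lstripped _
  have hr : PySem.Chars.rstrip (PySem.Str.strip raw).toList = (PySem.Str.strip raw).toList := by
    rw [PySem.Str.strip, String.toList_ofList]; exact pv_strip_rstripped _
  by_cases hg : PySem.Str.strip raw = "" ∨ PySem.Str.startswith (PySem.Str.strip raw) "%" = true
      ∨ PySem.Str.startswith (PySem.Str.strip raw) "#" = true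
      ∨ PySem.Str.startswith (PySem.Str.strip raw) "//" = true
  · rw [if_pos hg]
    have hcc : pvCutCfg (PySem.Str.strip raw).toList = [] := by
      apply pv_guard
      rcases hg with h | h | h | h
      · exact Or.inl (by rw [h]; rfl)
      · exact Or.inr (Or.inl h)
      · exact Or.inr (Or.inr (Or.inl h))
      · exact Or.inr (Or.inr (Or.inr h))
    rw [hcc, pv_rstrip_nil]
    simp
  · rw [if_neg hg]
    have hm1 : ("%" : String).toList = ['%'] := by decide
    have hm2 : ("#" : String).toList = ['#'] := by decide
    have hm3 : ("//" : String).toList = ['/', '/'] := by decide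
    have h1 := pv_stepA "%" (by decide) (PySem.Str.strip raw) hl hr
    rw [hm1] at h1
    have hpre1 : pvF ['%'] (PySem.Str.strip raw).toList <+: (PySem.Str.strip raw).toList :=
      pvF_prefix _ _
    have h2 := pv_stepA "#" (by decide) (String.ofList (pvF ['%'] (PySem.Str.strip raw).toList))
      (by rw [String.toList_ofList]; exact pv_lstrip_prefix hpre1 hl)
      (by rw [String.toList_ofList]; exact pvF_rstripped _ _)
    rw [hm2, String.toList_ofList] at h2
    have hpre2 : pvF ['#'] (pvF ['%'] (PySem.Str.strip raw).toList)
        <+: (PySem.Str.strip raw).toList := (pvF_prefix _ _).trans hpre1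
    have h3 := pv_stepA "//" (by decide)
      (String.ofList (pvF ['#'] (pvF ['%'] (PySem.Str.strip raw).toList)))
      (by rw [String.toList_ofList]; exact pv_lstrip_prefix hpre2 hl)
      (by rw [String.toList_ofList]; exact pvF_rstripped _ _)
    rw [hm3, String.toList_ofList] at h3
    rw [List.foldl_cons, List.foldl_cons, List.foldl_cons, List.foldl_nil]
    rw [h1, h2, h3, pv_main]

-- ===== VERDICT (by name: the statement is the Claim_ definition above) =====
theorem clean_cfg_lines_spec : Claim_equal_clean_cfg_lines := by
  intro text _
  unfold Spec_clean_cfg_lines clean_cfg_lines clean_cfg_lines_alt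
  rw [pv_step_eq]
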